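-- pv_equiv track=rewrite | github.com/mfa1zan/Tibbe-AG | backend/app/services/evidence_formatter.py | _pick_best_mechanism
-- ===== SOURCE A (Python) =====
-- def _pick_best_mechanism(mechanisms: list[str]) -> str | None:
--     """Return the strongest mechanism from a list, or None."""
--     priority = [
--         "IS_IDENTICAL_TO", "IDENTICAL",
--         "IS_LIKELY_EQUIVALENT_TO", "LIKELY",
--         "IS_WEAK_MATCH_TO", "WEAK",
--     ]
--     for p in priority:
--         if p in mechanisms:
--             return p
--     return mechanisms[0] if mechanisms else None
-- ===== SOURCE B (Python) =====
-- def _pick_best_mechanism(mechanisms: list[str]) -> str | None: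
--     """Return the strongest mechanism from a list, or None."""
--     priority = [
--         "IS_IDENTICAL_TO", "IDENTICAL",
--         "IS_LIKELY_EQUIVALENT_TO", "LIKELY",
--         "IS_WEAK_MATCH_TO", "WEAK",
--     ]
--     ranks = {name: i for i, name in enumerate(priority)}
--     if not mechanisms:
--         return None
--     return min(mechanisms, key=lambda m: ranks.get(m, len(priority)))
-- ===== Notes on version B (the rewrite author's own statement) =====
-- stated objective: alternative
-- what changed: Instead of scanning the fixed priority list and membership-testing each name against mechanisms, B builds a name-to-rank table once and takes min over mechanisms keyed by table lookup (unknown names rank worst), with an explicit empty guard; min's first-among-ties rule reproduces both the priority preference and the mechanisms[0] fallback.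
import Mathlib
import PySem

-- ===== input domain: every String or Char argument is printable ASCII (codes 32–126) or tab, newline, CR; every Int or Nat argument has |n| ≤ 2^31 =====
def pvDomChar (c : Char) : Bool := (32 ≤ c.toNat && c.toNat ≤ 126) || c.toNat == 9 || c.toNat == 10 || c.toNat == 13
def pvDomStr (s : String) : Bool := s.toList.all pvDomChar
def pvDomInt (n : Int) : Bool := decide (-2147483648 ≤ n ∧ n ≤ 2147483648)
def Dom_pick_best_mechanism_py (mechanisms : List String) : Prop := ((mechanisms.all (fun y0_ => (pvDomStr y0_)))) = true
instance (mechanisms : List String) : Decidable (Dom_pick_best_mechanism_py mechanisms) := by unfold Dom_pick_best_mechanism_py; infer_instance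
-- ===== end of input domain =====

-- B replaces A's scan over the fixed priority list (with a membership test per step) by one
-- pass over `mechanisms` taking the min under a precomputed rank table (objective: alternative).

-- ===== PORT A =====
def pvPriorityA : List String :=
  ["IS_IDENTICAL_TO", "IDENTICAL",
   "IS_LIKELY_EQUIVALENT_TO", "LIKELY",
   "IS_WEAK_MATCH_TO", "WEAK"]

-- `for p in priority: if p in mechanisms: return p` is the first p of priority contained in
-- mechanisms; `mechanisms[0] if mechanisms else None` is head?.
def pick_best_mechanism_py (mechanisms : List String) : Option String :=
  match pvPriorityA.find? (fun p => mechanisms.contains p) with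
  | some p => some p
  | none => mechanisms.head?

-- ===== PORT B =====
def pvPriorityB : List String :=
  ["IS_IDENTICAL_TO", "IDENTICAL",
   "IS_LIKELY_EQUIVALENT_TO", "LIKELY",
   "IS_WEAK_MATCH_TO", "WEAK"]

-- ranks = {name: i for i, name in enumerate(priority)}
def pvRanksB : PySem.Dict String Int :=
  (PySem.List.enumerate pvPriorityB 0).foldl (fun d p => d.insert p.2 p.1) PySem.Dict.empty

-- min(mechanisms, key=lambda m: ranks.get(m, len(priority)))
def pick_best_mechanism_py_alt (mechanisms : List String) : Option String :=
  if mechanisms.isEmpty then none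
  else PySem.List.min? mechanisms (fun m => pvRanksB.getD m 6)

-- ===== PRECONDITION & SPEC =====
def Spec_pick_best_mechanism_py (mechanisms : List String) (out : Option String) : Prop := out = pick_best_mechanism_py_alt mechanisms
instance (mechanisms : List String) (out : Option String) : Decidable (Spec_pick_best_mechanism_py mechanisms out) := by unfold Spec_pick_best_mechanism_py; infer_instance

-- ===== CLAIM (what is proved, stated in full; the proofs are below) =====
def Claim_equal_pick_best_mechanism_py : Prop := ∀ (mechanisms : List String), Dom_pick_best_mechanism_py mechanisms → Spec_pick_best_mechanism_py mechanisms (pick_best_mechanism_py mechanisms)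

-- ===== LEMMAS AND PROOFS =====

-- B's rank-table lookup, written out as an if-chain over the six priority names.
lemma pvKey_eq (m : String) : pvRanksB.getD m 6 =
    if "IS_IDENTICAL_TO" = m then 0 else if "IDENTICAL" = m then 1
    else if "IS_LIKELY_EQUIVALENT_TO" = m then 2 else if "LIKELY" = m then 3
    else if "IS_WEAK_MATCH_TO" = m then 4 else if "WEAK" = m then 5 else 6 := by
  have h : pvRanksB = PySem.Dict.mk
      [("IS_IDENTICAL_TO", 0), ("IDENTICAL", 1), ("IS_LIKELY_EQUIVALENT_TO", 2),
       ("LIKELY", 3), ("IS_WEAK_MATCH_TO", 4), ("WEAK", 5)] := by decide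
  rw [h]
  simp only [PySem.Dict.getD, PySem.Dict.get?_mk_cons, beq_iff_eq]
  split_ifs <;> simp [PySem.Dict.get?]

lemma pvKey_le (m : String) : pvRanksB.getD m 6 ≤ 6 := by
  rw [pvKey_eq]; split_ifs <;> omega

-- min?'s folding step, named so the stay-put lemma below can state it
def pvStep (acc : Option String) (x : String) : Option String :=
  match acc with
  | none => some x
  | some c => if pvRanksB.getD x 6 < pvRanksB.getD c 6 then some x else some c

-- in the all-unranked case the min?-fold never replaces its accumulator
lemma pvFoldl_stay (t : List String) (b : String)
    (h : ∀ y ∈ t, ¬ (pvRanksB.getD y 6 < pvRanksB.getD b 6)) :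
    t.foldl pvStep (some b) = some b := by
  induction t with
  | nil => rfl
  | cons y t ih =>
      have hy := h y (by simp)
      simp only [List.foldl_cons, pvStep, if_neg hy]
      exact ih (fun z hz => h z (by simp [hz]))

-- the central lemma: on a nonempty list, A returns exactly the element min? picks
lemma pvMain (m : String) (t : List String) (r : String)
    (hr : PySem.List.min? (m :: t) (fun s => pvRanksB.getD s 6) = some r) :
    pick_best_mechanism_py (m :: t) = some r := by
  have hmem : r ∈ m :: t := PySem.List.min?_mem hr
  have hmin : ∀ y ∈ m :: t, pvRanksB.getD r 6 ≤ pvRanksB.getD y 6 :=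
    PySem.List.min?_isMin hr
  have k0 : pvRanksB.getD "IS_IDENTICAL_TO" 6 = 0 := by decide
  have k1 : pvRanksB.getD "IDENTICAL" 6 = 1 := by decide
  have k2 : pvRanksB.getD "IS_LIKELY_EQUIVALENT_TO" 6 = 2 := by decide
  have k3 : pvRanksB.getD "LIKELY" 6 = 3 := by decide
  have k4 : pvRanksB.getD "IS_WEAK_MATCH_TO" 6 = 4 := by decide
  have k5 : pvRanksB.getD "WEAK" 6 = 5 := by decide
  have hk := pvKey_eq r
  -- a priority name strictly better than r cannot be in the list
  have hnot : ∀ p : String, p ∈ pvPriorityA →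
      pvRanksB.getD p 6 < pvRanksB.getD r 6 → p ∉ (m :: t) := by
    intro p _ hlt hp
    exact absurd (hmin p hp) (by omega)
  split_ifs at hk with h0 h1 h2 h3 h4 h5
  · subst h0
    have c0 := List.contains_iff_mem.2 hmem
    simp only [pick_best_mechanism_py, pvPriorityA, List.find?, c0]
  · subst h1
    have n0 : ("IS_IDENTICAL_TO":String) ∉ (m :: t) := hnot _ (by decide) (by omega)
    have f0 := Bool.eq_false_iff.mpr (fun hc => n0 (List.contains_iff_mem.mp hc))
    have c1 := List.contains_iff_mem.2 hmem
    simp only [pick_best_mechanism_py, pvPriorityA, List.find?, f0, c1]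
  · subst h2
    have n0 : ("IS_IDENTICAL_TO":String) ∉ (m :: t) := hnot _ (by decide) (by omega)
    have f0 := Bool.eq_false_iff.mpr (fun hc => n0 (List.contains_iff_mem.mp hc))
    have n1 : ("IDENTICAL":String) ∉ (m :: t) := hnot _ (by decide) (by omega)
    have f1 := Bool.eq_false_iff.mpr (fun hc => n1 (List.contains_iff_mem.mp hc))
    have c2 := List.contains_iff_mem.2 hmem
    simp only [pick_best_mechanism_py, pvPriorityA, List.find?, f0, f1, c2]
  · subst h3
    have n0 : ("IS_IDENTICAL_TO":String) ∉ (m :: t) := hnot _ (by decide) (by omega)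
    have f0 := Bool.eq_false_iff.mpr (fun hc => n0 (List.contains_iff_mem.mp hc))
    have n1 : ("IDENTICAL":String) ∉ (m :: t) := hnot _ (by decide) (by omega)
    have f1 := Bool.eq_false_iff.mpr (fun hc => n1 (List.contains_iff_mem.mp hc))
    have n2 : ("IS_LIKELY_EQUIVALENT_TO":String) ∉ (m :: t) := hnot _ (by decide) (by omega)
    have f2 := Bool.eq_false_iff.mpr (fun hc => n2 (List.contains_iff_mem.mp hc))
    have c3 := List.contains_iff_mem.2 hmem
    simp only [pick_best_mechanism_py, pvPriorityA, List.find?, f0, f1, f2, c3]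
  · subst h4
    have n0 : ("IS_IDENTICAL_TO":String) ∉ (m :: t) := hnot _ (by decide) (by omega)
    have f0 := Bool.eq_false_iff.mpr (fun hc => n0 (List.contains_iff_mem.mp hc))
    have n1 : ("IDENTICAL":String) ∉ (m :: t) := hnot _ (by decide) (by omega)
    have f1 := Bool.eq_false_iff.mpr (fun hc => n1 (List.contains_iff_mem.mp hc))
    have n2 : ("IS_LIKELY_EQUIVALENT_TO":String) ∉ (m :: t) := hnot _ (by decide) (by omega)
    have f2 := Bool.eq_false_iff.mpr (fun hc => n2 (List.contains_iff_mem.mp hc))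
    have n3 : ("LIKELY":String) ∉ (m :: t) := hnot _ (by decide) (by omega)
    have f3 := Bool.eq_false_iff.mpr (fun hc => n3 (List.contains_iff_mem.mp hc))
    have c4 := List.contains_iff_mem.2 hmem
    simp only [pick_best_mechanism_py, pvPriorityA, List.find?, f0, f1, f2, f3, c4]
  · subst h5
    have n0 : ("IS_IDENTICAL_TO":String) ∉ (m :: t) := hnot _ (by decide) (by omega)
    have f0 := Bool.eq_false_iff.mpr (fun hc => n0 (List.contains_iff_mem.mp hc))
    have n1 : ("IDENTICAL":String) ∉ (m :: t) := hnot _ (by decide) (by omega)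
    have f1 := Bool.eq_false_iff.mpr (fun hc => n1 (List.contains_iff_mem.mp hc))
    have n2 : ("IS_LIKELY_EQUIVALENT_TO":String) ∉ (m :: t) := hnot _ (by decide) (by omega)
    have f2 := Bool.eq_false_iff.mpr (fun hc => n2 (List.contains_iff_mem.mp hc))
    have n3 : ("LIKELY":String) ∉ (m :: t) := hnot _ (by decide) (by omega)
    have f3 := Bool.eq_false_iff.mpr (fun hc => n3 (List.contains_iff_mem.mp hc))
    have n4 : ("IS_WEAK_MATCH_TO":String) ∉ (m :: t) := hnot _ (by decide) (by omega)
    have f4 := Bool.eq_false_iff.mpr (fun hc => n4 (List.contains_iff_mem.mp hc))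
    have c5 := List.contains_iff_mem.2 hmem
    simp only [pick_best_mechanism_py, pvPriorityA, List.find?, f0, f1, f2, f3, f4, c5]
  · -- no priority name occurs: A falls back to the head, and min? never replaces it
    have hall : ∀ y ∈ m :: t, pvRanksB.getD y 6 = 6 := by
      intro y hy
      have h1 := hmin y hy
      have h2 := pvKey_le y
      omega
    have n0 : ("IS_IDENTICAL_TO":String) ∉ (m :: t) := fun hp => by have := hall _ hp; omega
    have f0 := Bool.eq_false_iff.mpr (fun hc => n0 (List.contains_iff_mem.mp hc))
    have n1 : ("IDENTICAL":String) ∉ (m :: t) := fun hp => by have := hall _ hp; omega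
    have f1 := Bool.eq_false_iff.mpr (fun hc => n1 (List.contains_iff_mem.mp hc))
    have n2 : ("IS_LIKELY_EQUIVALENT_TO":String) ∉ (m :: t) := fun hp => by have := hall _ hp; omega
    have f2 := Bool.eq_false_iff.mpr (fun hc => n2 (List.contains_iff_mem.mp hc))
    have n3 : ("LIKELY":String) ∉ (m :: t) := fun hp => by have := hall _ hp; omega
    have f3 := Bool.eq_false_iff.mpr (fun hc => n3 (List.contains_iff_mem.mp hc))
    have n4 : ("IS_WEAK_MATCH_TO":String) ∉ (m :: t) := fun hp => by have := hall _ hp; omega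
    have f4 := Bool.eq_false_iff.mpr (fun hc => n4 (List.contains_iff_mem.mp hc))
    have n5 : ("WEAK":String) ∉ (m :: t) := fun hp => by have := hall _ hp; omega
    have f5 := Bool.eq_false_iff.mpr (fun hc => n5 (List.contains_iff_mem.mp hc))
    have hfold : PySem.List.min? (m :: t) (fun s => pvRanksB.getD s 6) = some m := by
      have hdef : PySem.List.min? (m :: t) (fun s => pvRanksB.getD s 6)
          = List.foldl pvStep none (m :: t) := by
        unfold PySem.List.min?
        congr 1
        funext acc x
        cases acc <;> rfl
      rw [hdef, List.foldl_cons]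
      exact pvFoldl_stay t m (fun y hy => by
        have h1 := hall y (by simp [hy]); have h2 := hall m (by simp); omega)
    have hrm : r = m := by rw [hfold] at hr; exact (Option.some_inj.mp hr).symm
    subst hrm
    simp only [pick_best_mechanism_py, pvPriorityA, List.find?, f0, f1, f2, f3, f4, f5,
      List.head?_cons]

-- ===== VERDICT (by name: the statement is the Claim_ definition above) =====
theorem pick_best_mechanism_py_spec : Claim_equal_pick_best_mechanism_py := by
  intro ms _
  show pick_best_mechanism_py ms = pick_best_mechanism_py_alt ms
  cases ms with
  | nil => rfl
  | cons m t =>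
      cases hr : PySem.List.min? (m :: t) (fun s => pvRanksB.getD s 6) with
      | none => exact absurd ((PySem.List.min?_eq_none_iff _ _).mp hr) (by simp)
      | some r =>
          rw [pvMain m t r hr]
          simp [pick_best_mechanism_py_alt, hr]
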